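-- pv_equiv track=rewrite | github.com/Brian-Mascitello/Advent-of-Code | Advent of Code 2015/Day 19 2015/Day19Q2 2015.py | distill_input
-- ===== SOURCE A (Python) =====
-- def distill_input(molecule):
--     # Each capital is eventually going to be turned into an electron e, which is lowercase.
--     capital_letters = 0
--
--     for letter in molecule:
--         if 'A' <= letter <= 'Z':
--             capital_letters += 1
--
--     # Ar and Rn occurrences are unable to create new element combos and must be broken down.
--     # However both Ar and Rn exist in the same complex groups, and are taken out in the same step.
--     ar_count = molecule.count('Ar')
--     rn_count = molecule.count('Rn')
--
--     # Y is only found in combos with both Ar and Rn, so it is counted as a capital twice as often as a step to remove.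
--     y_count = molecule.count('Y') * 2
--
--     minimum_steps = capital_letters - ar_count - rn_count - y_count - 1
--
--     return minimum_steps
-- ===== SOURCE B (Python) =====
-- def distill_input(molecule):
--     # One fused left-to-right pass tallying capitals, non-overlapping 'Ar'/'Rn', and 'Y'.
--     capitals = ar = rn = y = 0
--     i = 0
--     n = len(molecule)
--     while i < n:
--         c = molecule[i]
--         if 'A' <= c <= 'Z':
--             capitals += 1
--         if c == 'Y':
--             y += 1
--         pair = molecule[i:i + 2]
--         if pair == 'Ar':
--             ar += 1
--             i += 2
--         elif pair == 'Rn':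
--             rn += 1
--             i += 2
--         else:
--             i += 1
--     return capitals - ar - rn - 2 * y - 1
-- ===== Notes on version B (the rewrite author's own statement) =====
-- stated objective: alternative
-- what changed: Replaces A's separate capital-counting loop plus three str.count scans with a single left-to-right index walk that tallies capitals, the two non-overlapping two-letter group markers and the Y separator in one pass.
import Mathlib
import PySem

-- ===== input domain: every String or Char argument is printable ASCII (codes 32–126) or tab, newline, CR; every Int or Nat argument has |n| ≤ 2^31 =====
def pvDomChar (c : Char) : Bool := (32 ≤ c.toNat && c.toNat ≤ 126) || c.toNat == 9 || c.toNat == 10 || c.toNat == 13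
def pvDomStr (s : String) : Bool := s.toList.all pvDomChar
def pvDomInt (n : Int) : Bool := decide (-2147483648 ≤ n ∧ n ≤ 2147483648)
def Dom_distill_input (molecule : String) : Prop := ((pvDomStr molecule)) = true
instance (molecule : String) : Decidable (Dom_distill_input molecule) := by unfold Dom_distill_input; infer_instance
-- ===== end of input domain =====

-- B replaces A's capital-counting loop plus three str.count scans by one fused left-to-right pass (alternative decomposition, same cost).

-- ===== PORT A =====
def distill_input (molecule : String) : Int :=
  let capital_letters : Int :=
    molecule.toList.foldl (fun acc letter => if 'A' ≤ letter ∧ letter ≤ 'Z' then acc + 1 else acc) 0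
  let ar_count : Int := (PySem.Str.count molecule "Ar" : Int)
  let rn_count : Int := (PySem.Str.count molecule "Rn" : Int)
  let y_count : Int := (PySem.Str.count molecule "Y" : Int) * 2
  capital_letters - ar_count - rn_count - y_count - 1

-- ===== PORT B =====
-- the while-loop of Source B: state (capitals, ar, rn, y), advancing by 2 on an 'Ar'/'Rn' match
def distillAltGo : List Char → Int → Int → Int → Int → Int
  | [], capitals, ar, rn, y => capitals - ar - rn - 2 * y - 1
  | c :: rest, capitals, ar, rn, y =>
    let capitals' := if 'A' ≤ c ∧ c ≤ 'Z' then capitals + 1 else capitals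
    let y' := if c = 'Y' then y + 1 else y
    if c = 'A' ∧ rest.head? = some 'r' then distillAltGo rest.tail capitals' (ar + 1) rn y'
    else if c = 'R' ∧ rest.head? = some 'n' then distillAltGo rest.tail capitals' ar (rn + 1) y'
    else distillAltGo rest capitals' ar rn y'
  termination_by cs => cs.length
  decreasing_by
    · cases rest <;> simp
    · cases rest <;> simp
    · simp

def distill_input_alt (molecule : String) : Int :=
  distillAltGo molecule.toList 0 0 0 0

-- ===== PRECONDITION & SPEC =====
def Spec_distill_input (molecule : String) (out : Int) : Prop := out = distill_input_alt molecule
instance (molecule : String) (out : Int) : Decidable (Spec_distill_input molecule out) := by unfold Spec_distill_input; infer_instance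

-- ===== CLAIM (what is proved, stated in full; the proofs are below) =====
def Claim_equal_distill_input : Prop := ∀ (molecule : String), Dom_distill_input molecule → Spec_distill_input molecule (distill_input molecule)

-- ===== LEMMAS AND PROOFS =====

-- non-overlapping occurrence count, the recursion Chars.count.go performs with the fuel removed
def cnt (sub : List Char) : List Char → Nat
  | [] => 0
  | c :: t => if sub.isPrefixOf (c :: t) then 1 + cnt sub (t.drop (sub.length - 1)) else cnt sub t
  termination_by cs => cs.length
  decreasing_by all_goals simp

lemma count_go_eq_cnt (sub : List Char) (hsub : sub ≠ []) :
    ∀ (fuel : Nat) (s : List Char) (acc : Nat), s.length ≤ fuel →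
      PySem.Chars.count.go sub fuel s acc = acc + cnt sub s := by
  intro fuel
  induction fuel with
  | zero =>
    intro s acc h
    have : s = [] := List.eq_nil_of_length_eq_zero (by omega)
    subst this
    simp [PySem.Chars.count.go, cnt]
  | succ n ih =>
    intro s acc h
    match s with
    | [] => simp [PySem.Chars.count.go, cnt]
    | c :: t =>
      rw [PySem.Chars.count.go, cnt]
      by_cases hp : sub.isPrefixOf (c :: t)
      · simp only [hp, if_true]
        have hlen : 1 ≤ sub.length := by cases sub <;> simp_all
        have hdrop : (c :: t).drop sub.length = t.drop (sub.length - 1) := by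
          cases sub with
          | nil => simp_all
          | cons a b => simp
        have hd : (List.drop sub.length (c :: t)).length = (c :: t).length - sub.length :=
          List.length_drop
        rw [hdrop, ih _ _ (by simp at h; rw [hdrop] at hd; simp at hd ⊢; omega)]
        omega
      · simp [hp]
        rw [ih _ _ (by simp at h; omega)]

lemma count_eq_cnt (s sub : List Char) (hsub : sub ≠ []) :
    PySem.Chars.count s sub = cnt sub s := by
  rw [PySem.Chars.count]
  have he : sub.isEmpty = false := by cases sub <;> simp_all
  rw [he]
  simp only [Bool.false_eq_true, if_false]
  rw [count_go_eq_cnt sub hsub s.length s 0 le_rfl]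
  omega

-- cnt of a pattern is unchanged when the head cannot start it
lemma cnt_cons_ne (sub : List Char) (c : Char) (t : List Char)
    (h : ¬ sub.isPrefixOf (c :: t)) : cnt sub (c :: t) = cnt sub t := by
  rw [cnt]; simp [h]

-- invariant of Source B's loop: the running tallies plus what remains give A's closed form
lemma distillAltGo_eq (n : Nat) :
    ∀ (cs : List Char), cs.length ≤ n → ∀ (capitals ar rn y : Int),
      distillAltGo cs capitals ar rn y =
        (capitals + (cs.countP (fun letter => decide ('A' ≤ letter ∧ letter ≤ 'Z')) : Int))
          - (ar + (cnt ['A','r'] cs : Int)) - (rn + (cnt ['R','n'] cs : Int))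
          - 2 * (y + (cnt ['Y'] cs : Int)) - 1 := by
  induction n with
  | zero =>
    intro cs h capitals ar rn y
    have : cs = [] := List.eq_nil_of_length_eq_zero (by omega)
    subst this
    simp [distillAltGo, cnt]
  | succ n ih =>
    intro cs h capitals ar rn y
    match cs with
    | [] => simp [distillAltGo, cnt]
    | c :: rest =>
      rw [distillAltGo]
      by_cases hA : c = 'A' ∧ rest.head? = some 'r'
      · obtain ⟨hc, hr⟩ := hA
        subst hc
        cases rest with
        | nil => simp at hr
        | cons r t =>
          simp at hr
          subst hr
          simp only [List.head?_cons, List.tail_cons]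
          rw [if_pos (by simp)]
          rw [ih t (by simp at h; omega)]
          have h1 : cnt ['A','r'] ('A' :: 'r' :: t) = 1 + cnt ['A','r'] t := by
            rw [cnt]; simp [List.isPrefixOf]
          have h2 : cnt ['R','n'] ('A' :: 'r' :: t) = cnt ['R','n'] t := by
            rw [cnt_cons_ne _ _ _ (by simp [List.isPrefixOf]), cnt_cons_ne _ _ _ (by simp [List.isPrefixOf])]
          have h3 : cnt ['Y'] ('A' :: 'r' :: t) = cnt ['Y'] t := by
            rw [cnt_cons_ne _ _ _ (by simp [List.isPrefixOf]), cnt_cons_ne _ _ _ (by simp [List.isPrefixOf])]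
          rw [h1, h2, h3]
          simp
          push_cast
          ring
      · by_cases hR : c = 'R' ∧ rest.head? = some 'n'
        · obtain ⟨hc, hn⟩ := hR
          subst hc
          cases rest with
          | nil => simp at hn
          | cons r t =>
            simp at hn
            subst hn
            simp only [List.head?_cons, List.tail_cons]
            rw [if_neg (by simp), if_pos (by simp)]
            rw [ih t (by simp at h; omega)]
            have h1 : cnt ['A','r'] ('R' :: 'n' :: t) = cnt ['A','r'] t := by
              rw [cnt_cons_ne _ _ _ (by simp [List.isPrefixOf]), cnt_cons_ne _ _ _ (by simp [List.isPrefixOf])]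
            have h2 : cnt ['R','n'] ('R' :: 'n' :: t) = 1 + cnt ['R','n'] t := by
              rw [cnt]; simp [List.isPrefixOf]
            have h3 : cnt ['Y'] ('R' :: 'n' :: t) = cnt ['Y'] t := by
              rw [cnt_cons_ne _ _ _ (by simp [List.isPrefixOf]), cnt_cons_ne _ _ _ (by simp [List.isPrefixOf])]
            rw [h1, h2, h3]
            simp
            push_cast
            ring
        · rw [if_neg hA, if_neg hR]
          rw [ih rest (by simp at h; omega)]
          have h1 : cnt ['A','r'] (c :: rest) = cnt ['A','r'] rest := by
            apply cnt_cons_ne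
            intro hp
            cases rest with
            | nil => simp [List.isPrefixOf] at hp
            | cons r t =>
              simp [List.isPrefixOf] at hp
              exact hA ⟨hp.1.symm, by simp [← hp.2]⟩
          have h2 : cnt ['R','n'] (c :: rest) = cnt ['R','n'] rest := by
            apply cnt_cons_ne
            intro hp
            cases rest with
            | nil => simp [List.isPrefixOf] at hp
            | cons r t =>
              simp [List.isPrefixOf] at hp
              exact hR ⟨hp.1.symm, by simp [← hp.2]⟩
          have h3 : cnt ['Y'] (c :: rest) = if c = 'Y' then 1 + cnt ['Y'] rest else cnt ['Y'] rest := by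
            rw [cnt]
            by_cases hy : c = 'Y'
            · subst hy; simp [List.isPrefixOf]
            · have hyc : ('Y' == c) = false := by simp [Ne.symm hy]
              simp [List.isPrefixOf, hy, hyc]
          rw [h1, h2, h3]
          by_cases hy : c = 'Y'
          · subst hy
            rw [if_pos (⟨by decide, by decide⟩ : ('A' : Char) ≤ 'Y' ∧ ('Y' : Char) ≤ 'Z'), if_pos rfl]
            simp
            push_cast
            ring
          · by_cases hcap : 'A' ≤ c ∧ c ≤ 'Z' <;>
              simp [hcap, hy, Ne.symm hy] <;> push_cast <;> ring

-- ===== VERDICT (by name: the statement is the Claim_ definition above) =====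
theorem distill_input_spec : Claim_equal_distill_input := by
  intro molecule _
  unfold Spec_distill_input distill_input distill_input_alt
  rw [distillAltGo_eq molecule.toList.length molecule.toList le_rfl]
  simp only [PySem.Str.count]
  rw [count_eq_cnt _ _ (by simp), count_eq_cnt _ _ (by simp), count_eq_cnt _ _ (by simp)]
  rw [PySem.List.foldl_ite_add_one]
  have hAr : "Ar".toList = ['A','r'] := rfl
  have hRn : "Rn".toList = ['R','n'] := rfl
  have hY : "Y".toList = ['Y'] := rfl
  rw [hAr, hRn, hY]
  ring
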